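-- pv_equiv track=rewrite | github.com/Shahid-Mo/CSE-531-Algorithm-Analysis-and-Design | Analysis of Algorithms/subset_sum.py | subset_sum_maximize_weight
-- ===== SOURCE A (Python) =====
-- def subset_sum_maximize_weight(weights, W):
--     """
--     Solves the Subset Sum problem to maximize the total weight of the selected items without exceeding the given capacity.
--
--     Parameters:
--     weights (list): List of weights of items.
--     W (int): Capacity of the subset sum.
--
--     Returns:
--     int: Maximum total weight of the selected items.
--     list: Indices of the selected items.
--     """
--     n = len(weights)
--     dp = [[0 for _ in range(W + 1)] for _ in range(n + 1)]
--
--     for i in range(1, n + 1):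
--         for w in range(1, W + 1):
--             if weights[i - 1] <= w:
--                 dp[i][w] = max(dp[i - 1][w], weights[i - 1] + dp[i - 1][w - weights[i - 1]])
--             else:
--                 dp[i][w] = dp[i - 1][w]
--
--     # Extract the selected items
--     selected_items = []
--     w = W
--     for i in range(n, 0, -1):
--         if dp[i][w] != dp[i - 1][w]:
--             selected_items.append(i - 1)
--             w -= weights[i - 1]
--
--     return dp[n][W], selected_items[::-1]
-- ===== SOURCE B (Python) =====
-- def subset_sum_maximize_weight(weights, W):
--     """One-dimensional knapsack: a single capacity array updated in place from
--     high to low capacity, plus one set per item of the capacities at which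
--     taking the item strictly improves the value (same tie-break as the table:
--     exclude wins on equality).  Reconstruction walks the sets backward."""
--     n = len(weights)
--     arr = [0] * (W + 1)
--     improved = []  # improved[i]: capacities where item i strictly improves
--     for wt in weights:
--         s = set()
--         for w in range(W, wt - 1, -1):
--             cand = arr[w - wt] + wt
--             if cand > arr[w]:
--                 arr[w] = cand
--                 s.add(w)
--         improved.append(s)
--     total = arr[W]
--     selected = []
--     w = W
--     for i in range(n - 1, -1, -1):
--         if w in improved[i]:
--             selected.append(i)
--             w -= weights[i]
--     selected.reverse()
--     return total, selected
-- ===== Notes on version B (the rewrite author's own statement) =====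
-- stated objective: faster
-- what changed: Replaces the (n+1)x(W+1) DP table (plus reconstruction by re-comparing table rows) with a single 1-D capacity array updated in place from high to low capacity and one per-item set of the capacities at which taking the item strictly improves the value; reconstruction walks those sets backward.
-- outside the precondition, e.g. on subset_sum_maximize_weight([-1], 0): A returns (0, []), B raises IndexError
import Mathlib
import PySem

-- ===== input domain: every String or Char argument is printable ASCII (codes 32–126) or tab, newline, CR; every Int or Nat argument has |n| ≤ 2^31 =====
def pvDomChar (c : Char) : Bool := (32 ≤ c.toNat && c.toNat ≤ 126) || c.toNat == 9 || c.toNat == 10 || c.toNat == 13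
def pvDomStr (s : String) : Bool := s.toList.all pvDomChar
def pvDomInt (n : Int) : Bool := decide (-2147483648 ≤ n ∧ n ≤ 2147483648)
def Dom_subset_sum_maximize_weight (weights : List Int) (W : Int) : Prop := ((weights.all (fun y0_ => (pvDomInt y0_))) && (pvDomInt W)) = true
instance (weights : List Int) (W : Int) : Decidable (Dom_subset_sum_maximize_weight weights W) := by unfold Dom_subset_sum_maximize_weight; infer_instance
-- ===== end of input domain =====

-- B replaces the (n+1)×(W+1) table (rebuilt rows + table comparisons at reconstruction) by a
-- single capacity array updated in place high-to-low plus one per-item set of strictly improving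
-- capacities; measurably faster by a constant factor, same values and tie-breaks.

-- ===== PORT A =====
-- dp[i][w]; every access in A under Pre_ has 0 ≤ i < len dp and 0 ≤ w < len dp[i], so getD is exact
def pvGet2 (dp : List (List Int)) (i w : Int) : Int :=
  PySem.List.pyGetD (PySem.List.pyGetD dp i []) w 0

-- the body of A's inner loop: dp[i][w] = … (indices i ≥ 1, w ≥ 1 from the ranges, so pySetD is exact)
def pvStepW (weights : List Int) (i : Int) (dp : List (List Int)) (w : Int) : List (List Int) :=
  let wt := PySem.List.pyGetD weights (i - 1) 0
  if wt ≤ w then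
    PySem.List.pySetD dp i
      (PySem.List.pySetD (PySem.List.pyGetD dp i []) w
        (max (pvGet2 dp (i - 1) w) (wt + pvGet2 dp (i - 1) (w - wt))))
  else
    PySem.List.pySetD dp i
      (PySem.List.pySetD (PySem.List.pyGetD dp i []) w (pvGet2 dp (i - 1) w))

def subset_sum_maximize_weight (weights : List Int) (W : Int) : Int × List Int :=
  let n : Int := (weights.length : Int)
  let dp0 : List (List Int) :=
    (PySem.List.pyRange 0 (n + 1) 1).map
      (fun _ => (PySem.List.pyRange 0 (W + 1) 1).map (fun _ => (0 : Int)))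
  let dp := (PySem.List.pyRange 1 (n + 1) 1).foldl
    (fun d i => (PySem.List.pyRange 1 (W + 1) 1).foldl (pvStepW weights i) d) dp0
  let r := (PySem.List.pyRange n 0 (-1)).foldl
    (fun (p : List Int × Int) i =>
      if pvGet2 dp i p.2 ≠ pvGet2 dp (i - 1) p.2 then
        (p.1 ++ [i - 1], p.2 - PySem.List.pyGetD weights (i - 1) 0)
      else p) ([], W)
  (pvGet2 dp n W, (PySem.List.slice? r.1 none none (-1)).getD [])   -- selected_items[::-1]

-- ===== PORT B =====
-- B's inner loop: for w in range(W, wt-1, -1): in-place improvement of arr plus the improvement set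
def pvInnerB (W : Int) (wt : Int) (q0 : List Int × PySem.Set Int) : List Int × PySem.Set Int :=
  (PySem.List.pyRange W (wt - 1) (-1)).foldl
    (fun q w =>
      let cand := PySem.List.pyGetD q.1 (w - wt) 0 + wt
      if PySem.List.pyGetD q.1 w 0 < cand then (PySem.List.pySetD q.1 w cand, PySem.Set.add q.2 w)
      else q) q0

def subset_sum_maximize_weight_alt (weights : List Int) (W : Int) : Int × List Int :=
  let n : Int := (weights.length : Int)
  let st := weights.foldl
    (fun (st : List Int × List (PySem.Set Int)) wt =>
      let q := pvInnerB W wt (st.1, PySem.Set.empty)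
      (q.1, st.2 ++ [q.2]))
    (List.replicate (W + 1).toNat (0 : Int), [])   -- [0] * (W + 1)
  let r := (PySem.List.pyRange (n - 1) (-1) (-1)).foldl
    (fun (p : List Int × Int) i =>
      if PySem.Set.contains (PySem.List.pyGetD st.2 i PySem.Set.empty) p.2 then
        (p.1 ++ [i], p.2 - PySem.List.pyGetD weights i 0)
      else p) ([], W)
  (PySem.List.pyGetD st.1 W 0, r.1.reverse)

-- ===== PRECONDITION & SPEC =====
-- Pre_ excludes W < 0 (A raises IndexError) and lists with a negative weight: there A raises
-- IndexError whenever W ≥ 1, and on the remaining corner W = 0 A returns (0, []) while B itself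
-- raises IndexError (its rolling array is indexed past its end), so those inputs are excluded too.
def Pre_subset_sum_maximize_weight (weights : List Int) (W : Int) : Prop :=
  0 ≤ W ∧ ∀ x ∈ weights, 0 ≤ x
instance (weights : List Int) (W : Int) : Decidable (Pre_subset_sum_maximize_weight weights W) := by
  unfold Pre_subset_sum_maximize_weight; infer_instance

def pvWitness_subset_sum_maximize_weight : List Int × Int := ([2, 3, 4], 6)

def Spec_subset_sum_maximize_weight (weights : List Int) (W : Int) (out : Int × List Int) : Prop := out = subset_sum_maximize_weight_alt weights W
instance (weights : List Int) (W : Int) (out : Int × List Int) : Decidable (Spec_subset_sum_maximize_weight weights W out) := by unfold Spec_subset_sum_maximize_weight; infer_instance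

-- ===== CLAIM (what is proved, stated in full; the proofs are below) =====
def Claim_equal_subset_sum_maximize_weight : Prop := ∀ (weights : List Int) (W : Int), Dom_subset_sum_maximize_weight weights W → Pre_subset_sum_maximize_weight weights W → Spec_subset_sum_maximize_weight weights W (subset_sum_maximize_weight weights W)

-- ===== LEMMAS AND PROOFS =====

-- the common value recurrence: pvF ws i w = best total weight among the first i items within capacity w
def pvF (ws : List Int) : Nat → Int → Int
  | 0, _ => 0
  | i + 1, w =>
    if w ≤ 0 then 0
    else if ws.getD i 0 ≤ w then
      max (pvF ws i w) (ws.getD i 0 + pvF ws i (w - ws.getD i 0))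
    else pvF ws i w

-- row i of the full table, capacities 0..WN
def pvRow (ws : List Int) (WN : Nat) (i : Nat) : List Int :=
  (List.range (WN + 1)).map (fun (w : Nat) => pvF ws i (w : Int))

-- row i+1 as A's inner loop builds it, filled up to capacity m (untouched entries still 0)
def pvMix (ws : List Int) (WN : Nat) (i m : Nat) : List Int :=
  (List.range (WN + 1)).map (fun (w : Nat) => if w ≤ m then pvF ws (i + 1) (w : Int) else 0)

-- B's in-place array mid-update: entries ≤ b still row i, entries > b already row i+1
def pvMixB (ws : List Int) (WN : Nat) (i : Nat) (b : Int) : List Int :=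
  (List.range (WN + 1)).map (fun (w : Nat) => if (w : Int) ≤ b then pvF ws i (w : Int) else pvF ws (i + 1) (w : Int))

-- the whole table after the first k outer iterations of A (rows > k still all-zero)
def pvDpK (ws : List Int) (WN : Nat) (k : Nat) : List (List Int) :=
  (List.range (ws.length + 1)).map
    (fun j => if j ≤ k then pvRow ws WN j else List.replicate (WN + 1) (0 : Int))

-- the common reconstruction recursion (indices descending, the order both loops append in)
def pvSel (ws : List Int) : Nat → Int → List Int × Int
  | 0, w => ([], w)
  | i + 1, w =>
    if pvF ws (i + 1) w ≠ pvF ws i w then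
      let p := pvSel ws i (w - ws.getD i 0)
      ((i : Int) :: p.1, p.2)
    else pvSel ws i w

-- membership condition of B's i-th improvement set
def pvCond (ws : List Int) (W : Int) (i : Nat) (x : Int) : Prop :=
  ws.getD i 0 ≤ x ∧ x ≤ W ∧ pvF ws (i + 1) x ≠ pvF ws i x

lemma pvWt_nonneg (ws : List Int) (hws : ∀ x ∈ ws, 0 ≤ x) (i : Nat) : 0 ≤ ws.getD i 0 := by
  rcases Nat.lt_or_ge i ws.length with h | h
  · rw [List.getD_eq_getElem ws 0 h]
    exact hws _ (List.getElem_mem h)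
  · rw [List.getD_eq_default ws 0 h]

lemma pvF_nonpos (ws : List Int) (i : Nat) (w : Int) (h : w ≤ 0) : pvF ws i w = 0 := by
  cases i <;> simp [pvF, h]

lemma pvF_succ_ne (ws : List Int) (i : Nat) (w : Int)
    (h : pvF ws (i + 1) w ≠ pvF ws i w) : ws.getD i 0 ≤ w ∧ 0 < w := by
  simp only [pvF] at h
  split_ifs at h with h1 h2
  · rw [pvF_nonpos ws i w h1] at h; exact absurd rfl h
  · exact ⟨h2, by omega⟩
  · exact absurd rfl h

lemma pvF_succ_of_lt (ws : List Int) (i : Nat) (w : Int) (h : w < ws.getD i 0) :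
    pvF ws (i + 1) w = pvF ws i w := by
  simp only [pvF]
  split_ifs with h1 h2
  · exact (pvF_nonpos ws i w h1).symm
  · omega
  · rfl

lemma pvRow_getD (ws : List Int) (WN : Nat) (i : Nat) (w : Int) (h0 : 0 ≤ w) (hw : w ≤ (WN : Int)) :
    PySem.List.pyGetD (pvRow ws WN i) w 0 = pvF ws i w := by
  have hw' : w = ((w.toNat : Nat) : Int) := (Int.toNat_of_nonneg h0).symm
  rw [hw', PySem.List.pyGetD_natCast]
  unfold pvRow
  rw [PySem.List.getD_map_range _ _ _ _ (by omega)]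

lemma pvMixB_getD (ws : List Int) (WN : Nat) (i : Nat) (b : Int) (w : Int) (h0 : 0 ≤ w) (hw : w ≤ (WN : Int)) :
    PySem.List.pyGetD (pvMixB ws WN i b) w 0 = if w ≤ b then pvF ws i w else pvF ws (i + 1) w := by
  have hw' : w = ((w.toNat : Nat) : Int) := (Int.toNat_of_nonneg h0).symm
  rw [hw', PySem.List.pyGetD_natCast]
  unfold pvMixB
  rw [PySem.List.getD_map_range _ _ _ _ (by omega)]

lemma pvMix_zero (ws : List Int) (WN : Nat) (i : Nat) :
    pvMix ws WN i 0 = List.replicate (WN + 1) (0 : Int) := by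
  apply List.ext_getElem (by simp [pvMix])
  intro k h1 h2
  simp only [pvMix, List.getElem_map, List.getElem_range, List.getElem_replicate]
  split_ifs with h
  · have hk : k = 0 := by omega
    subst hk
    exact pvF_nonpos _ _ _ (by simp)
  · rfl

lemma pvMix_full (ws : List Int) (WN : Nat) (i : Nat) :
    pvMix ws WN i WN = pvRow ws WN (i + 1) := by
  apply List.ext_getElem (by simp [pvMix, pvRow])
  intro k h1 h2
  have hk : k < WN + 1 := by simpa [pvMix] using h1
  simp only [pvMix, pvRow, List.getElem_map, List.getElem_range]
  rw [if_pos (by omega)]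

lemma pvRow_zero (ws : List Int) (WN : Nat) :
    pvRow ws WN 0 = List.replicate (WN + 1) (0 : Int) := by
  apply List.ext_getElem (by simp [pvRow])
  intro k h1 h2
  simp [pvRow, pvF]

lemma pvMix_set (ws : List Int) (WN : Nat) (i m : Nat) :
    (pvMix ws WN i m).set (m + 1) (pvF ws (i + 1) ((m : Int) + 1)) = pvMix ws WN i (m + 1) := by
  apply List.ext_getElem (by simp [pvMix])
  intro k h1 h2
  have hk : k < WN + 1 := by simpa [pvMix] using h2
  rw [List.getElem_set]
  simp only [pvMix, List.getElem_map, List.getElem_range]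
  split_ifs with hk1 h3 h4 <;> first | rfl | (exfalso; omega) | (subst hk1; norm_cast)

lemma pvMixB_hi (ws : List Int) (WN : Nat) (i : Nat) (b : Int) (hb : (WN : Int) ≤ b) :
    pvMixB ws WN i b = pvRow ws WN i := by
  apply List.map_congr_left
  intro w hw
  rw [List.mem_range] at hw
  rw [if_pos (by omega)]

lemma pvMixB_low (ws : List Int) (WN : Nat) (i : Nat) (b : Int) (hb : b ≤ ws.getD i 0 - 1) :
    pvMixB ws WN i b = pvRow ws WN (i + 1) := by
  apply List.map_congr_left
  intro w hw
  split_ifs with h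
  · exact (pvF_succ_of_lt ws i _ (by omega)).symm
  · rfl

lemma pvMixB_set (ws : List Int) (WN : Nat) (i : Nat) (b : Int) (h0 : 0 ≤ b) :
    (pvMixB ws WN i b).set b.toNat (pvF ws (i + 1) b) = pvMixB ws WN i (b - 1) := by
  apply List.ext_getElem (by simp [pvMixB])
  intro k h1 h2
  have hk : k < WN + 1 := by simpa [pvMixB] using h2
  have hbt : ((b.toNat : Nat) : Int) = b := Int.toNat_of_nonneg h0
  rw [List.getElem_set]
  simp only [pvMixB, List.getElem_map, List.getElem_range]
  split_ifs with hk1 h3 h3 <;> first | rfl | (exfalso; omega) | (subst hk1; rw [hbt])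

lemma pvMixB_nowrite (ws : List Int) (WN : Nat) (i : Nat) (b : Int)
    (h : pvF ws (i + 1) b = pvF ws i b) : pvMixB ws WN i b = pvMixB ws WN i (b - 1) := by
  apply List.map_congr_left
  intro w hw
  split_ifs with h1 h2 h2
  · rfl
  · have hwb : (w : Int) = b := by omega
    rw [hwb, h]
  · exfalso; omega
  · rfl

lemma pvSet_self {α : Type} (l : List α) (n : Nat) (a : α) (h : l[n]? = some a) :
    l.set n a = l := by
  apply List.ext_getElem (by simp)
  intro k hk1 hk2
  rw [List.getElem_set]
  split_ifs with hkn
  · obtain ⟨hh, hv⟩ := List.getElem?_eq_some_iff.mp h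
    subst hkn
    exact hv.symm
  · rfl

-- A's inner loop fills row i+1 of the table with the recurrence values up to capacity m
lemma pvInnerA_loop (ws : List Int) (WN : Nat) (i : Nat) (hwt : 0 ≤ ws.getD i 0)
    (dp : List (List Int)) (hlen : i + 1 < dp.length)
    (hdi : dp[i]? = some (pvRow ws WN i))
    (hdi1 : dp[i + 1]? = some (List.replicate (WN + 1) (0 : Int))) :
    ∀ m : Nat, m ≤ WN →
      (PySem.List.pyRange 1 ((m : Int) + 1) 1).foldl (pvStepW ws ((i : Int) + 1)) dp
        = dp.set (i + 1) (pvMix ws WN i m) := by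
  intro m
  induction m with
  | zero =>
    intro _
    rw [show ((0 : Nat) : Int) + 1 = 1 by norm_num, PySem.List.pyRange_one_eq_nil le_rfl,
        List.foldl_nil, pvMix_zero]
    exact (pvSet_self _ _ _ hdi1).symm
  | succ m ih =>
    intro hm1
    have hm : m ≤ WN := Nat.le_of_succ_le hm1
    rw [show ((m + 1 : Nat) : Int) + 1 = ((m : Int) + 1) + 1 by push_cast; ring,
        PySem.List.pyRange_one_succ_right (by omega), List.foldl_append, ih hm,
        List.foldl_cons, List.foldl_nil]
    have hlen' : i + 1 < (dp.set (i + 1) (pvMix ws WN i m)).length := by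
      simpa using hlen
    have hgetwt : PySem.List.pyGetD ws ((i : Int) + 1 - 1) 0 = ws.getD i 0 := by
      rw [show ((i : Int) + 1 - 1) = ((i : Nat) : Int) by ring, PySem.List.pyGetD_natCast]
    have hrowi : PySem.List.pyGetD (dp.set (i + 1) (pvMix ws WN i m)) ((i : Int) + 1 - 1) []
        = pvRow ws WN i := by
      rw [show ((i : Int) + 1 - 1) = ((i : Nat) : Int) by ring, PySem.List.pyGetD_natCast,
          List.getD_eq_getElem?_getD, List.getElem?_set_ne (by omega), hdi]
      rfl
    have hrowi1 : PySem.List.pyGetD (dp.set (i + 1) (pvMix ws WN i m)) ((i : Int) + 1) []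
        = pvMix ws WN i m := by
      rw [show ((i : Int) + 1) = ((i + 1 : Nat) : Int) by push_cast; ring,
          PySem.List.pyGetD_natCast, List.getD_eq_getElem?_getD,
          List.getElem?_set_self (by omega)]
      rfl
    have hg1 : pvGet2 (dp.set (i + 1) (pvMix ws WN i m)) ((i : Int) + 1 - 1) ((m : Int) + 1)
        = pvF ws i ((m : Int) + 1) := by
      unfold pvGet2
      rw [hrowi]
      exact pvRow_getD ws WN i _ (by omega) (by exact_mod_cast hm1)
    have hsetrow : ∀ v : Int,
        PySem.List.pySetD (pvMix ws WN i m) ((m : Int) + 1) v = (pvMix ws WN i m).set (m + 1) v := by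
      intro v
      rw [show ((m : Int) + 1) = ((m + 1 : Nat) : Int) by push_cast; ring,
          PySem.List.pySetD_natCast]
    have hsetdp : ∀ r : List Int,
        PySem.List.pySetD (dp.set (i + 1) (pvMix ws WN i m)) ((i : Int) + 1) r
          = dp.set (i + 1) r := by
      intro r
      rw [show ((i : Int) + 1) = ((i + 1 : Nat) : Int) by push_cast; ring,
          PySem.List.pySetD_natCast, List.set_set]
    simp only [pvStepW]
    rw [hgetwt, hrowi1]
    by_cases hcase : ws.getD i 0 ≤ (m : Int) + 1
    · rw [if_pos hcase]
      have hg2 : pvGet2 (dp.set (i + 1) (pvMix ws WN i m)) ((i : Int) + 1 - 1)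
          ((m : Int) + 1 - ws.getD i 0) = pvF ws i ((m : Int) + 1 - ws.getD i 0) := by
        unfold pvGet2
        rw [hrowi]
        exact pvRow_getD ws WN i _ (by omega) (by
          have : ((m : Int) + 1) ≤ (WN : Int) := by exact_mod_cast hm1
          omega)
      rw [hg1, hg2, hsetrow, hsetdp]
      have hv : max (pvF ws i ((m : Int) + 1))
          (ws.getD i 0 + pvF ws i ((m : Int) + 1 - ws.getD i 0)) = pvF ws (i + 1) ((m : Int) + 1) := by
        simp only [pvF]
        rw [if_neg (by omega), if_pos hcase]
      rw [hv, pvMix_set]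
    · rw [if_neg hcase, hg1, hsetrow, hsetdp]
      have hv : pvF ws i ((m : Int) + 1) = pvF ws (i + 1) ((m : Int) + 1) := by
        simp only [pvF]
        rw [if_neg (by omega), if_neg hcase]
      rw [hv, pvMix_set]

lemma pvDpK_set (ws : List Int) (WN : Nat) (k : Nat) :
    (pvDpK ws WN k).set (k + 1) (pvRow ws WN (k + 1)) = pvDpK ws WN (k + 1) := by
  apply List.ext_getElem (by simp [pvDpK])
  intro j h1 h2
  have hj : j < ws.length + 1 := by simpa [pvDpK] using h2
  rw [List.getElem_set]
  simp only [pvDpK, List.getElem_map, List.getElem_range]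
  split_ifs with he h3 h4 <;> first | rfl | (exfalso; omega) | (subst he; rfl)

-- A's outer loop: after k items the table is pvDpK k
lemma pvOuterA (ws : List Int) (WN : Nat) (hws : ∀ x ∈ ws, 0 ≤ x) :
    ∀ k, k ≤ ws.length →
      (PySem.List.pyRange 1 ((k : Int) + 1) 1).foldl
        (fun d i => (PySem.List.pyRange 1 ((WN : Int) + 1) 1).foldl (pvStepW ws i) d)
        (pvDpK ws WN 0)
      = pvDpK ws WN k := by
  intro k
  induction k with
  | zero =>
    intro _
    rw [show ((0 : Nat) : Int) + 1 = 1 by norm_num, PySem.List.pyRange_one_eq_nil le_rfl,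
        List.foldl_nil]
  | succ k ih =>
    intro hk1
    have hk : k ≤ ws.length := by omega
    have hkk : k < ws.length + 1 := by omega
    have hkk1 : k + 1 < ws.length + 1 := by omega
    rw [show ((k + 1 : Nat) : Int) + 1 = ((k : Int) + 1) + 1 by push_cast; ring,
        show PySem.List.pyRange 1 (((k : Int) + 1) + 1) 1
            = PySem.List.pyRange 1 ((k : Int) + 1) 1 ++ [(k : Int) + 1] from
          PySem.List.pyRange_one_succ_right (by omega),
        List.foldl_append, ih hk, List.foldl_cons, List.foldl_nil]
    have h1 : (pvDpK ws WN k)[k]? = some (pvRow ws WN k) := by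
      simp [pvDpK, hkk]
    have h2 : (pvDpK ws WN k)[k + 1]? = some (List.replicate (WN + 1) (0 : Int)) := by
      simp [pvDpK, hkk1]
    have hlen : k + 1 < (pvDpK ws WN k).length := by
      simp [pvDpK]
      omega
    rw [pvInnerA_loop ws WN k (pvWt_nonneg ws hws k) _ hlen h1 h2 WN le_rfl, pvMix_full,
        pvDpK_set ws WN k]

lemma pvDp0_eq (ws : List Int) (WN : Nat) :
    (PySem.List.pyRange 0 ((ws.length : Int) + 1) 1).map
      (fun _ => (PySem.List.pyRange 0 ((WN : Int) + 1) 1).map (fun _ => (0 : Int)))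
    = pvDpK ws WN 0 := by
  have hz : (PySem.List.pyRange 0 ((WN : Int) + 1) 1).map (fun _ => (0 : Int))
      = List.replicate (WN + 1) (0 : Int) := by
    rw [List.map_const']
    congr 1
    rw [PySem.List.length_pyRange_one]
    omega
  have hr : pvDpK ws WN 0 = List.replicate (ws.length + 1) (List.replicate (WN + 1) (0 : Int)) := by
    apply List.ext_getElem (by simp [pvDpK])
    intro k h1 h2
    simp only [pvDpK, List.getElem_map, List.getElem_range, List.getElem_replicate]
    split_ifs with h
    · have hk0 : k = 0 := by omega
      subst hk0
      exact pvRow_zero ws WN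
    · rfl
  rw [hr]
  simp only [hz]
  rw [List.map_const']
  congr 1
  rw [PySem.List.length_pyRange_one]
  omega

lemma pvGet2_dpK (ws : List Int) (WN : Nat) (j : Nat) (hj : j ≤ ws.length)
    (w : Int) (h0 : 0 ≤ w) (hw : w ≤ (WN : Int)) :
    pvGet2 (pvDpK ws WN ws.length) (j : Int) w = pvF ws j w := by
  have hj1 : j < ws.length + 1 := by omega
  have hrow : (pvDpK ws WN ws.length)[j]? = some (pvRow ws WN j) := by
    simp [pvDpK, hj1, hj]
  unfold pvGet2
  rw [PySem.List.pyGetD_natCast, List.getD_eq_getElem?_getD, hrow, Option.getD_some]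
  exact pvRow_getD ws WN j w h0 hw

-- A's reconstruction loop = pvSel
lemma pvReconA (ws : List Int) (WN : Nat) (hws : ∀ x ∈ ws, 0 ≤ x) :
    ∀ (k : Nat), k ≤ ws.length → ∀ (acc : List Int) (w : Int), 0 ≤ w → w ≤ (WN : Int) →
      (PySem.List.pyRange (k : Int) 0 (-1)).foldl
        (fun (p : List Int × Int) i =>
          if pvGet2 (pvDpK ws WN ws.length) i p.2 ≠ pvGet2 (pvDpK ws WN ws.length) (i - 1) p.2 then
            (p.1 ++ [i - 1], p.2 - PySem.List.pyGetD ws (i - 1) 0)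
          else p) (acc, w)
      = (acc ++ (pvSel ws k w).1, (pvSel ws k w).2) := by
  intro k
  induction k with
  | zero =>
    intro _ acc w _ _
    rw [show ((0 : Nat) : Int) = 0 by norm_num, PySem.List.pyRange_neg_one_eq_nil le_rfl,
        List.foldl_nil]
    simp [pvSel]
  | succ k ih =>
    intro hk1 acc w h0 hw
    have hk : k ≤ ws.length := by omega
    rw [show ((k + 1 : Nat) : Int) = (k : Int) + 1 by push_cast; ring,
        PySem.List.pyRange_neg_one_cons (by omega), List.foldl_cons]
    dsimp only
    have e1 : (k : Int) + 1 - 1 = ((k : Nat) : Int) := by ring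
    have hga : pvGet2 (pvDpK ws WN ws.length) ((k : Int) + 1) w = pvF ws (k + 1) w := by
      rw [show ((k : Int) + 1) = ((k + 1 : Nat) : Int) by push_cast; ring]
      exact pvGet2_dpK ws WN (k + 1) hk1 w h0 hw
    have hgb : pvGet2 (pvDpK ws WN ws.length) ((k : Int) + 1 - 1) w = pvF ws k w := by
      rw [e1]
      exact pvGet2_dpK ws WN k hk w h0 hw
    rw [hga, hgb, e1, PySem.List.pyGetD_natCast]
    by_cases hne : pvF ws (k + 1) w ≠ pvF ws k w
    · rw [if_pos hne]
      obtain ⟨hwle, hwpos⟩ := pvF_succ_ne ws k w hne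
      have h0' : 0 ≤ w - ws.getD k 0 := by omega
      have hw' : w - ws.getD k 0 ≤ (WN : Int) := by
        have := pvWt_nonneg ws hws k
        omega
      rw [ih hk (acc ++ [(k : Int)]) _ h0' hw']
      simp only [pvSel, if_pos hne]
      simp [List.append_assoc]
    · rw [if_neg hne]
      rw [ih hk acc w h0 hw]
      simp only [pvSel, if_neg hne]

-- B's inner loop: in-place update of the capacity array plus the improvement set
lemma pvInnerB_loop (ws : List Int) (WN : Nat) (hws : ∀ x ∈ ws, 0 ≤ x) (i : Nat) :
    ∀ (t : Nat) (b : Int), b = ws.getD i 0 - 1 + (t : Int) → b ≤ (WN : Int) →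
      ∀ (s : PySem.Set Int), ∃ s' : PySem.Set Int,
        (PySem.List.pyRange b (ws.getD i 0 - 1) (-1)).foldl
          (fun (q : List Int × PySem.Set Int) w =>
            let cand := PySem.List.pyGetD q.1 (w - ws.getD i 0) 0 + ws.getD i 0
            if PySem.List.pyGetD q.1 w 0 < cand then
              (PySem.List.pySetD q.1 w cand, PySem.Set.add q.2 w)
            else q) (pvMixB ws WN i b, s)
        = (pvMixB ws WN i (ws.getD i 0 - 1), s')
        ∧ ∀ x : Int, x ∈ s' ↔ x ∈ s ∨ (ws.getD i 0 ≤ x ∧ x ≤ b ∧ pvF ws (i + 1) x ≠ pvF ws i x) := by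
  intro t
  induction t with
  | zero =>
    intro b hb hbW s
    have hb' : b = ws.getD i 0 - 1 := by push_cast at hb; omega
    subst hb'
    rw [PySem.List.pyRange_neg_one_eq_nil le_rfl, List.foldl_nil]
    refine ⟨s, rfl, ?_⟩
    intro x
    constructor
    · exact Or.inl
    · rintro (hx | ⟨h1, h2, h3⟩)
      · exact hx
      · omega
  | succ t ih =>
    intro b hb hbW s
    have hwt : 0 ≤ ws.getD i 0 := pvWt_nonneg ws hws i
    have hbgt : ws.getD i 0 - 1 < b := by push_cast at hb; omega
    have hb0 : 0 ≤ b := by omega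
    rw [PySem.List.pyRange_neg_one_cons hbgt, List.foldl_cons]
    dsimp only
    have hr1 : PySem.List.pyGetD (pvMixB ws WN i b) (b - ws.getD i 0) 0
        = pvF ws i (b - ws.getD i 0) := by
      rw [pvMixB_getD ws WN i b _ (by omega) (by omega), if_pos (by omega)]
    have hr2 : PySem.List.pyGetD (pvMixB ws WN i b) b 0 = pvF ws i b := by
      rw [pvMixB_getD ws WN i b b hb0 hbW, if_pos le_rfl]
    rw [hr1, hr2]
    by_cases hlt : pvF ws i b < pvF ws i (b - ws.getD i 0) + ws.getD i 0
    · rw [if_pos hlt]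
      have hbpos : ¬ b ≤ 0 := by
        intro hb0'
        have hbz : b = 0 := le_antisymm hb0' hb0
        have hwt0 : ws.getD i 0 = 0 := by omega
        rw [hbz, hwt0] at hlt
        simp at hlt
      have hv : pvF ws (i + 1) b = pvF ws i (b - ws.getD i 0) + ws.getD i 0 := by
        simp only [pvF]
        rw [if_neg hbpos, if_pos (by omega), max_eq_right (by omega)]
        ring
      rw [PySem.List.pySetD_of_nonneg _ _ hb0,
          show pvF ws i (b - ws.getD i 0) + ws.getD i 0 = pvF ws (i + 1) b from hv.symm,
          pvMixB_set ws WN i b hb0]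
      obtain ⟨s', heq, hmem⟩ := ih (b - 1) (by push_cast at hb ⊢; omega) (by omega)
        (PySem.Set.add s b)
      refine ⟨s', heq, ?_⟩
      intro x
      rw [hmem x, PySem.Set.mem_add]
      constructor
      · rintro ((hx | rfl) | ⟨h1, h2, h3⟩)
        · exact Or.inl hx
        · exact Or.inr ⟨by omega, le_rfl, by rw [hv]; omega⟩
        · exact Or.inr ⟨h1, by omega, h3⟩
      · rintro (hx | ⟨h1, h2, h3⟩)
        · exact Or.inl (Or.inl hx)
        · by_cases hxb : x = b
          · exact Or.inl (Or.inr hxb)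
          · exact Or.inr ⟨h1, by omega, h3⟩
    · rw [if_neg hlt]
      have hv : pvF ws (i + 1) b = pvF ws i b := by
        by_cases hb0' : b ≤ 0
        · rw [pvF_nonpos _ _ _ hb0', pvF_nonpos _ _ _ hb0']
        · simp only [pvF]
          rw [if_neg hb0', if_pos (by omega), max_eq_left (by omega)]
      rw [pvMixB_nowrite ws WN i b hv]
      obtain ⟨s', heq, hmem⟩ := ih (b - 1) (by push_cast at hb ⊢; omega) (by omega) s
      refine ⟨s', heq, ?_⟩
      intro x
      rw [hmem x]
      constructor
      · rintro (hx | ⟨h1, h2, h3⟩)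
        · exact Or.inl hx
        · exact Or.inr ⟨h1, by omega, h3⟩
      · rintro (hx | ⟨h1, h2, h3⟩)
        · exact Or.inl hx
        · by_cases hxb : x = b
          · subst hxb
            exact absurd hv h3
          · exact Or.inr ⟨h1, by omega, h3⟩

-- one item of B's outer loop
lemma pvItemB (ws : List Int) (WN : Nat) (hws : ∀ x ∈ ws, 0 ≤ x) (i : Nat) :
    ∃ s' : PySem.Set Int,
      pvInnerB (WN : Int) (ws.getD i 0) (pvRow ws WN i, PySem.Set.empty)
        = (pvRow ws WN (i + 1), s')
      ∧ ∀ x : Int, x ∈ s' ↔ pvCond ws (WN : Int) i x := by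
  have hwt : 0 ≤ ws.getD i 0 := pvWt_nonneg ws hws i
  unfold pvInnerB
  by_cases hc : ws.getD i 0 - 1 ≤ (WN : Int)
  · obtain ⟨s', heq, hmem⟩ := pvInnerB_loop ws WN hws i
      ((WN : Int) - (ws.getD i 0 - 1)).toNat (WN : Int)
      (by rw [Int.toNat_of_nonneg (by omega)]; ring) le_rfl PySem.Set.empty
    rw [← pvMixB_hi ws WN i ((WN : Nat) : Int) le_rfl]
    refine ⟨s', by rw [heq, pvMixB_low ws WN i _ le_rfl], ?_⟩
    intro x
    rw [hmem x]
    unfold pvCond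
    simp [PySem.Set.empty]
  · rw [PySem.List.pyRange_neg_one_eq_nil (by omega), List.foldl_nil]
    have hrow : pvRow ws WN i = pvRow ws WN (i + 1) := by
      apply List.map_congr_left
      intro w hw
      rw [List.mem_range] at hw
      exact (pvF_succ_of_lt ws i _ (by omega)).symm
    refine ⟨PySem.Set.empty, by rw [hrow], ?_⟩
    intro x
    unfold pvCond
    constructor
    · intro hx
      exact absurd hx List.not_mem_nil
    · rintro ⟨h1, h2, _⟩
      omega

-- B's outer loop over the weights
lemma pvFoldB (ws : List Int) (WN : Nat) (hws : ∀ x ∈ ws, 0 ≤ x) :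
    ∀ (suf pre : List Int), ws = pre ++ suf → ∀ (impr : List (PySem.Set Int)),
      ∃ news : List (PySem.Set Int),
        suf.foldl
          (fun (st : List Int × List (PySem.Set Int)) wt =>
            let q := pvInnerB (WN : Int) wt (st.1, PySem.Set.empty)
            (q.1, st.2 ++ [q.2])) (pvRow ws WN pre.length, impr)
        = (pvRow ws WN ws.length, impr ++ news)
        ∧ news.length = suf.length
        ∧ ∀ (j : Nat) (x : Int), j < suf.length →
            (x ∈ news.getD j [] ↔ pvCond ws (WN : Int) (pre.length + j) x) := by
  intro suf
  induction suf with
  | nil =>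
    intro pre hpre impr
    have hl : pre.length = ws.length := by rw [hpre]; simp
    refine ⟨[], ?_, rfl, ?_⟩
    · simp only [List.foldl_nil, hl, List.append_nil]
    · intro j x hj
      exact absurd hj (by simp)
  | cons wt suf ih =>
    intro pre hpre impr
    rw [List.foldl_cons]
    dsimp only
    have hwteq : wt = ws.getD pre.length 0 := by
      rw [hpre, List.getD_eq_getElem?_getD, List.getElem?_append_right le_rfl]
      simp
    obtain ⟨S, hSeq, hSmem⟩ := pvItemB ws WN hws pre.length
    rw [hwteq, hSeq]
    dsimp only
    have hpre' : ws = (pre ++ [wt]) ++ suf := by rw [hpre]; simp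
    obtain ⟨news, hneq, hnlen, hnmem⟩ := ih (pre ++ [wt]) hpre' (impr ++ [S])
    rw [show (pre ++ [wt]).length = pre.length + 1 by simp] at hneq
    refine ⟨S :: news, ?_, by simp [hnlen], ?_⟩
    · rw [hneq]
      simp
    · intro j x hj
      cases j with
      | zero =>
        simpa using hSmem x
      | succ j =>
        have hmj := hnmem j x (by simpa using hj)
        rw [show (pre ++ [wt]).length = pre.length + 1 by simp] at hmj
        rw [List.getD_cons_succ, hmj,
            show pre.length + 1 + j = pre.length + (j + 1) by omega]

-- B's reconstruction loop = pvSel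
lemma pvReconB (ws : List Int) (WN : Nat) (hws : ∀ x ∈ ws, 0 ≤ x)
    (news : List (PySem.Set Int))
    (hmem : ∀ (j : Nat) (x : Int), j < ws.length → (x ∈ news.getD j [] ↔ pvCond ws (WN : Int) j x)) :
    ∀ (k : Nat), k ≤ ws.length → ∀ (acc : List Int) (w : Int), 0 ≤ w → w ≤ (WN : Int) →
      (PySem.List.pyRange ((k : Int) - 1) (-1) (-1)).foldl
        (fun (p : List Int × Int) i =>
          if PySem.Set.contains (PySem.List.pyGetD news i PySem.Set.empty) p.2 then
            (p.1 ++ [i], p.2 - PySem.List.pyGetD ws i 0)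
          else p) (acc, w)
      = (acc ++ (pvSel ws k w).1, (pvSel ws k w).2) := by
  intro k
  induction k with
  | zero =>
    intro _ acc w _ _
    rw [show ((0 : Nat) : Int) - 1 = -1 by norm_num, PySem.List.pyRange_neg_one_eq_nil le_rfl,
        List.foldl_nil]
    simp [pvSel]
  | succ k ih =>
    intro hk1 acc w h0 hw
    have hk : k ≤ ws.length := by omega
    rw [show ((k + 1 : Nat) : Int) - 1 = ((k : Nat) : Int) by push_cast; ring,
        PySem.List.pyRange_neg_one_cons (by omega), List.foldl_cons]
    dsimp only
    have hcond : (PySem.Set.contains (PySem.List.pyGetD news ((k : Nat) : Int) PySem.Set.empty) w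
        = true) ↔ (pvF ws (k + 1) w ≠ pvF ws k w) := by
      rw [PySem.List.pyGetD_natCast]
      have hc : (PySem.Set.contains (news.getD k PySem.Set.empty) w = true)
          ↔ w ∈ news.getD k PySem.Set.empty := by
        simp [PySem.Set.contains]
      rw [hc, show (PySem.Set.empty : PySem.Set Int) = ([] : List Int) from rfl,
          hmem k w (by omega)]
      unfold pvCond
      constructor
      · rintro ⟨_, _, h3⟩
        exact h3
      · intro hne
        obtain ⟨h1, h2⟩ := pvF_succ_ne ws k w hne
        exact ⟨h1, hw, hne⟩
    by_cases hne : pvF ws (k + 1) w ≠ pvF ws k w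
    · rw [if_pos (hcond.mpr hne)]
      obtain ⟨hwle, hwpos⟩ := pvF_succ_ne ws k w hne
      rw [PySem.List.pyGetD_natCast,
          ih hk (acc ++ [(k : Int)]) _ (by omega) (by have := pvWt_nonneg ws hws k; omega)]
      simp only [pvSel, if_pos hne]
      simp [List.append_assoc]
    · rw [if_neg (fun h => hne (hcond.mp h)),
          ih hk acc w h0 hw]
      simp only [pvSel, if_neg hne]

-- ===== VERDICT (by name: the statement is the Claim_ definition above) =====
theorem subset_sum_maximize_weight_spec : Claim_equal_subset_sum_maximize_weight := by
  intro ws W _ hpre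
  obtain ⟨hW, hws⟩ := hpre
  obtain ⟨WN, rfl⟩ := Int.eq_ofNat_of_zero_le hW
  unfold Spec_subset_sum_maximize_weight
  have hA : subset_sum_maximize_weight ws ((WN : Nat) : Int)
      = (pvF ws ws.length ((WN : Nat) : Int),
         ((pvSel ws ws.length ((WN : Nat) : Int)).1).reverse) := by
    simp only [subset_sum_maximize_weight]
    rw [pvDp0_eq ws WN, pvOuterA ws WN hws ws.length le_rfl,
        pvReconA ws WN hws ws.length le_rfl [] ((WN : Nat) : Int) (by omega) le_rfl,
        pvGet2_dpK ws WN ws.length le_rfl ((WN : Nat) : Int) (by omega) le_rfl,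
        PySem.List.slice?_none_none_neg_one]
    simp
  have hB : subset_sum_maximize_weight_alt ws ((WN : Nat) : Int)
      = (pvF ws ws.length ((WN : Nat) : Int),
         ((pvSel ws ws.length ((WN : Nat) : Int)).1).reverse) := by
    obtain ⟨news, hneq, hnlen, hnmem⟩ := pvFoldB ws WN hws ws [] rfl []
    simp only [List.length_nil, List.nil_append] at hneq
    simp only [List.length_nil, Nat.zero_add] at hnmem
    simp only [subset_sum_maximize_weight_alt]
    rw [show List.replicate ((((WN : Nat) : Int) + 1).toNat) (0 : Int) = pvRow ws WN 0 by
          rw [show ((((WN : Nat) : Int) + 1).toNat) = WN + 1 by omega, pvRow_zero],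
        hneq,
        pvReconB ws WN hws news hnmem ws.length le_rfl [] ((WN : Nat) : Int)
          (by omega) le_rfl,
        pvRow_getD ws WN ws.length ((WN : Nat) : Int) (by omega) le_rfl]
    simp
  rw [hA, hB]
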